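-- pv_equiv track=rewrite | github.com/Honeybee1023/recipes | lab.py | combine_recipes
-- ===== SOURCE A (Python) =====
-- def add_recipes(recipe_dicts):
--     """
--     Given a list of recipe dictionaries that map atomic food items to quantities,
--     return a new dictionary that maps each ingredient name
--     to the sum of its quantities across the given recipe dictionaries.
--
--     For example,
--         add_recipes([{'milk':1, 'chocolate':1}, {'sugar':1, 'milk':2}])
--     should return:
--         {'milk':3, 'chocolate': 1, 'sugar': 1}
--     """
--     new_dict = {}
--     for dict in recipe_dicts:
--         for item in dict.keys():
--             if item in new_dict.keys():
--                 new_dict[item] += dict[item]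
--             else:
--                 new_dict[item] = dict[item]
--     return new_dict
--
-- def combine_recipes(nested_recipes):
--     """
--     Given a list of lists of recipe dictionaries, where each inner list
--     represents all the recipes for a certain ingredient, compute and return a
--     list of recipe dictionaries that represent all the possible combinations of
--     ingredient recipes.
--     """
--     if len(nested_recipes) == 0:
--         return []
--     if len(nested_recipes) == 1:
--         return nested_recipes[0]
--     first_list = nested_recipes[0]
--     rest_of_lists = nested_recipes[1:]
--     rest_combo = combine_recipes(rest_of_lists)
--     return_list = []
--     for dict1 in first_list:
--         for dict2 in rest_combo:
--             return_list.append(add_recipes([dict1, dict2]))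
--     return return_list
-- ===== SOURCE B (Python) =====
-- def combine_recipes(nested_recipes):
--     if len(nested_recipes) == 0:
--         return []
--     if len(nested_recipes) == 1:
--         return nested_recipes[0]
--     combos = [{}]
--     for recipe_list in nested_recipes:
--         combos = [_merged(combo, recipe) for combo in combos for recipe in recipe_list]
--     return combos
--
-- def _merged(combo, recipe):
--     out = dict(combo)
--     for item, qty in recipe.items():
--         out[item] = out.get(item, 0) + qty
--     return out
-- ===== Notes on version B (the rewrite author's own statement) =====
-- stated objective: idiomatic
-- what changed: Replaced A's recursion on the list of lists (recursive combine of the tail, then pairwise add_recipes merges) by a single iterative left-fold that builds the Cartesian product with an accumulator of partially merged dicts, merging each recipe into the running combo in one pass; Pre_ only excludes association lists with duplicate keys inside one dict, which represent no Python dict input.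
import Mathlib
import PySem

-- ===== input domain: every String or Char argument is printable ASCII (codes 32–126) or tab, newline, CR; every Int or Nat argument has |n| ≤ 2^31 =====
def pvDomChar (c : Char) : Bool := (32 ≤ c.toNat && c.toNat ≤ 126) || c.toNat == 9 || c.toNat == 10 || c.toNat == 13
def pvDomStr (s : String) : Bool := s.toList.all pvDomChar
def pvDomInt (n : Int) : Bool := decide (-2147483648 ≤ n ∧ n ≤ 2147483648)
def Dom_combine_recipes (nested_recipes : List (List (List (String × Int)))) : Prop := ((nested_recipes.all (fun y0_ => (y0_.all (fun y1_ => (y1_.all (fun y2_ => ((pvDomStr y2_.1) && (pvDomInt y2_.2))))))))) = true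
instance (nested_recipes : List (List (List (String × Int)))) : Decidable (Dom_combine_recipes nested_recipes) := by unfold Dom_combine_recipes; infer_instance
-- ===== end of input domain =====

-- B replaces A's tail recursion by one iterative left-fold over the lists of recipes,
-- merging each recipe dict into the running combination in one pass (idiomatic, same cost).

-- ===== PORT A =====
-- Source A add_recipes: folds every dict's keys into a fresh dict, summing quantities.
-- dict[item] is always present (item ranges over dict.keys()), so getD is exact here.
def add_recipes (recipe_dicts : List (PySem.Dict String Int)) : PySem.Dict String Int :=
  recipe_dicts.foldl (fun new_dict d =>
    d.keys.foldl (fun new_dict item =>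
      if new_dict.contains item then
        new_dict.insert item (new_dict.getD item 0 + d.getD item 0)
      else
        new_dict.insert item (d.getD item 0)) new_dict) PySem.Dict.empty

def combine_recipes : List (List (List (String × Int))) → List (List (String × Int))
  | [] => []
  | [first] => first
  | first :: r :: rest' =>
    let rest_combo := combine_recipes (r :: rest')
    first.foldl (fun return_list dict1 =>
      rest_combo.foldl (fun return_list dict2 =>
        return_list ++ [(add_recipes [PySem.Dict.mk dict1, PySem.Dict.mk dict2]).items]) return_list) []

-- ===== PORT B =====
-- Source B _merged: copy combo, then out[item] = out.get(item, 0) + qty for each item of recipe.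
def pymergeB (combo recipe : PySem.Dict String Int) : PySem.Dict String Int :=
  recipe.items.foldl (fun out p => out.insert p.1 (out.getD p.1 0 + p.2)) combo

def combine_recipes_alt : List (List (List (String × Int))) → List (List (String × Int))
  | [] => []
  | [first] => first
  | l1 :: l2 :: rest =>
    (((l1 :: l2 :: rest).foldl
        (fun combos recipe_list =>
          combos.flatMap (fun combo =>
            recipe_list.map (fun recipe => pymergeB combo (PySem.Dict.mk recipe))))
        [PySem.Dict.empty]).map PySem.Dict.items)

-- ===== PRECONDITION & SPEC =====
-- The inner association lists stand for Python dicts; Pre_ excludes lists with duplicate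
-- keys inside one dict, which represent no Python dict input at all.
def Pre_combine_recipes (nested_recipes : List (List (List (String × Int)))) : Prop :=
  ∀ l ∈ nested_recipes, ∀ d ∈ l, (d.map Prod.fst).Nodup

instance (nested_recipes : List (List (List (String × Int)))) : Decidable (Pre_combine_recipes nested_recipes) := by
  unfold Pre_combine_recipes; infer_instance

def pvWitness_combine_recipes : (List (List (List (String × Int)))) :=
  [[[("milk", 1), ("sugar", 2)], [("egg", 1)]], [[("milk", 3)]]]

def Spec_combine_recipes (nested_recipes : List (List (List (String × Int)))) (out : List (List (String × Int))) : Prop := out = combine_recipes_alt nested_recipes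
instance (nested_recipes : List (List (List (String × Int)))) (out : List (List (String × Int))) : Decidable (Spec_combine_recipes nested_recipes out) := by unfold Spec_combine_recipes; infer_instance

-- ===== CLAIM (what is proved, stated in full; the proofs are below) =====
def Claim_equal_combine_recipes : Prop := ∀ (nested_recipes : List (List (List (String × Int)))), Dom_combine_recipes nested_recipes → Pre_combine_recipes nested_recipes → Spec_combine_recipes nested_recipes (combine_recipes nested_recipes)

-- ===== LEMMAS AND PROOFS =====

-- the right-nested Cartesian product both programs compute, as merged dicts
def prodR : List (List (List (String × Int))) → List (PySem.Dict String Int)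
  | [] => [PySem.Dict.empty]
  | l :: ls => l.flatMap (fun d => (prodR ls).map (fun r => pymergeB (PySem.Dict.mk d) r))

theorem nodup_keys_pymergeB (c r : PySem.Dict String Int) (hc : c.keys.Nodup) :
    (pymergeB c r).keys.Nodup := by
  unfold pymergeB
  induction r.items generalizing c with
  | nil => exact hc
  | cons p t ih => exact ih _ (PySem.Dict.nodup_keys_insert _ _ _ hc)

theorem getD_pymergeB (c r : PySem.Dict String Int) (hr : r.keys.Nodup) (k : String) :
    (pymergeB c r).getD k 0 = c.getD k 0 + r.getD k 0 := by
  unfold pymergeB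
  obtain ⟨ps⟩ := r
  simp only [PySem.Dict.keys_mk] at hr
  induction ps generalizing c with
  | nil =>
    simp [PySem.Dict.getD, PySem.Dict.get?]
  | cons p t ih =>
    obtain ⟨a, b⟩ := p
    simp only [List.map_cons, List.nodup_cons] at hr
    have hrec := ih (c.insert a (c.getD a 0 + b)) hr.2
    simp only [List.foldl_cons] at *
    rw [hrec, PySem.Dict.getD_insert]
    have hcons : (PySem.Dict.mk ((a, b) :: t)).getD k 0
        = if a = k then b else (PySem.Dict.mk t).getD k 0 := by
      simp only [PySem.Dict.getD, PySem.Dict.get?_mk_cons, beq_iff_eq]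
      by_cases h : a = k <;> simp [h]
    rw [hcons]
    by_cases hk : k = a
    · subst hk
      have : (PySem.Dict.mk t).contains k = false := by
        rw [Bool.eq_false_iff]
        intro hcontains
        exact hr.1 (by simpa [PySem.Dict.keys_mk] using
          (PySem.Dict.contains_iff_mem_keys (PySem.Dict.mk t) k).mp hcontains)
      rw [PySem.Dict.getD_of_not_contains _ _ this]
      simp
    · simp [hk, Ne.symm hk]

theorem contains_pymergeB (c r : PySem.Dict String Int) (k : String) :
    (pymergeB c r).contains k = (c.contains k || r.contains k) := by
  unfold pymergeB
  obtain ⟨ps⟩ := r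
  induction ps generalizing c with
  | nil =>
    show c.contains k = (c.contains k || (PySem.Dict.mk []).contains k)
    rw [show (PySem.Dict.mk ([] : List (String × Int))).contains k = false from rfl,
      Bool.or_false]
  | cons p t ih =>
    obtain ⟨a, b⟩ := p
    simp only [List.foldl_cons]
    rw [ih]
    have hmk : (PySem.Dict.mk ((a, b) :: t)).contains k
        = ((a == k) || (PySem.Dict.mk t).contains k) := rfl
    rw [PySem.Dict.contains_insert, hmk, show (k == a) = (a == k) from by
      cases h : (k == a)
      · cases h' : (a == k)
        · rfl
        · rw [eq_of_beq h'] at h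
          simp at h
      · rw [eq_of_beq h]; simp,
      Bool.or_assoc, Bool.or_left_comm]

theorem keys_pymergeB (c r : PySem.Dict String Int) (hr : r.keys.Nodup) :
    (pymergeB c r).keys = c.keys ++ r.keys.filter (fun k => !(c.contains k)) := by
  unfold pymergeB
  obtain ⟨ps⟩ := r
  simp only [PySem.Dict.keys_mk] at hr ⊢
  induction ps generalizing c with
  | nil => simp
  | cons p t ih =>
    obtain ⟨a, b⟩ := p
    simp only [List.map_cons, List.nodup_cons] at hr
    simp only [List.foldl_cons]
    rw [ih _ hr.2]
    have hfilter : ((t.map Prod.fst).filter (fun k => !((c.insert a (c.getD a 0 + b)).contains k)))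
        = ((t.map Prod.fst).filter (fun k => !(c.contains k))) := by
      apply List.filter_congr
      intro x hx
      have hxa : x ≠ a := fun h => hr.1 (h ▸ hx)
      rw [PySem.Dict.contains_insert]
      simp [hxa]
    rw [hfilter]
    by_cases hca : c.contains a = true
    · rw [PySem.Dict.keys_insert_of_contains _ _ hca]
      simp [hca]
    · rw [PySem.Dict.keys_insert_of_not_contains _ _ (by simpa using hca)]
      simp only [Bool.not_eq_true] at hca
      simp [hca, List.append_assoc]

theorem dict_items_eq_keys_map (d : PySem.Dict String Int) (hd : d.keys.Nodup) :
    d.items = d.keys.map (fun k => (k, d.getD k 0)) := by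
  unfold PySem.Dict.keys
  rw [List.map_map]
  have : ∀ p ∈ d.items, ((fun k => (k, d.getD k 0)) ∘ Prod.fst) p = id p := by
    intro p hp
    obtain ⟨k, v⟩ := p
    simp only [Function.comp, id]
    rw [PySem.Dict.getD_of_mem_items d hp hd]
  rw [List.map_congr_left this, List.map_id]

theorem dict_ext0 (a b : PySem.Dict String Int) (ha : a.keys.Nodup) (hb : b.keys.Nodup)
    (hk : a.keys = b.keys) (hv : ∀ k, a.getD k 0 = b.getD k 0) : a = b := by
  have : a.items = b.items := by
    rw [dict_items_eq_keys_map a ha, dict_items_eq_keys_map b hb, hk]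
    exact List.map_congr_left (fun k _ => by rw [hv k])
  obtain ⟨x⟩ := a; obtain ⟨y⟩ := b
  simpa using this

theorem pymergeB_assoc (a b c : PySem.Dict String Int)
    (ha : a.keys.Nodup) (hb : b.keys.Nodup) (hc : c.keys.Nodup) :
    pymergeB (pymergeB a b) c = pymergeB a (pymergeB b c) := by
  have hab : (pymergeB a b).keys.Nodup := nodup_keys_pymergeB a b ha
  have hbc : (pymergeB b c).keys.Nodup := nodup_keys_pymergeB b c hb
  apply dict_ext0 _ _ (nodup_keys_pymergeB _ c hab) (nodup_keys_pymergeB a _ ha)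
  · rw [keys_pymergeB _ _ hc, keys_pymergeB _ _ hb, keys_pymergeB _ _ hbc,
      keys_pymergeB _ _ hc, List.filter_append, List.append_assoc]
    congr 1
    congr 1
    rw [List.filter_filter]
    apply List.filter_congr
    intro k _
    rw [contains_pymergeB]
    cases h1 : a.contains k <;> cases h2 : b.contains k <;> simp
  · intro k
    rw [getD_pymergeB _ _ hc, getD_pymergeB _ _ hb, getD_pymergeB _ _ hbc,
      getD_pymergeB _ _ hc, Int.add_assoc]

theorem pymergeB_fresh (c : PySem.Dict String Int) (ps : List (String × Int))
    (hps : (ps.map Prod.fst).Nodup) (hfresh : ∀ p ∈ ps, c.contains p.1 = false) :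
    pymergeB c (PySem.Dict.mk ps) = PySem.Dict.mk (c.items ++ ps) := by
  unfold pymergeB
  induction ps generalizing c with
  | nil => obtain ⟨x⟩ := c; simp
  | cons p t ih =>
    obtain ⟨a, b⟩ := p
    rw [List.map_cons, List.nodup_cons] at hps
    simp only [List.foldl_cons]
    have hca : c.contains a = false := hfresh (a, b) (by simp)
    have hinsert : c.insert a (c.getD a 0 + b) = PySem.Dict.mk (c.items ++ [(a, b)]) := by
      rw [PySem.Dict.getD_of_not_contains _ _ hca]
      simp [PySem.Dict.insert, hca]
    rw [hinsert]
    have hstep := ih (PySem.Dict.mk (c.items ++ [(a, b)])) hps.2 ?_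
    · rw [hstep]; simp
    · intro q hq
      have hmem : q.1 ∈ t.map Prod.fst := List.mem_map_of_mem hq
      have hqa : (a == q.1) = false := by
        cases h : (a == q.1)
        · rfl
        · rw [← eq_of_beq h] at hmem
          exact absurd hmem hps.1
      have hcq : c.items.any (fun p => p.1 == q.1) = false :=
        hfresh q (List.mem_cons_of_mem _ hq)
      show (c.items ++ [(a, b)]).any (fun p => p.1 == q.1) = false
      rw [List.any_append]
      simp [hcq, hqa]

theorem pymergeB_empty_left (r : PySem.Dict String Int) (hr : r.keys.Nodup) :
    pymergeB PySem.Dict.empty r = r := by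
  obtain ⟨ps⟩ := r
  simp only [PySem.Dict.keys_mk] at hr
  rw [show (PySem.Dict.empty : PySem.Dict String Int) = PySem.Dict.mk [] from rfl,
    pymergeB_fresh _ ps hr (fun p _ => by simp [PySem.Dict.contains])]
  simp

theorem nodup_prodR (ls : List (List (List (String × Int))))
    (h : ∀ l ∈ ls, ∀ d ∈ l, (d.map Prod.fst).Nodup) :
    ∀ r ∈ prodR ls, r.keys.Nodup := by
  induction ls with
  | nil =>
    intro r hr
    simp only [prodR, List.mem_singleton] at hr
    subst hr
    simp [PySem.Dict.keys, PySem.Dict.empty]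
  | cons l ls ih =>
    intro r hr
    simp only [prodR, List.mem_flatMap, List.mem_map] at hr
    obtain ⟨d, hd, r', _, rfl⟩ := hr
    apply nodup_keys_pymergeB
    simpa [PySem.Dict.keys_mk] using h l (by simp) d hd

-- A's inner key loop equals B's one-pass items merge, for a duplicate-free dict
theorem addLoop_eq_pymergeB (d nd : PySem.Dict String Int) (hd : d.keys.Nodup) :
    d.keys.foldl (fun new_dict item =>
      if new_dict.contains item then
        new_dict.insert item (new_dict.getD item 0 + d.getD item 0)
      else
        new_dict.insert item (d.getD item 0)) nd = pymergeB nd d := by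
  unfold pymergeB
  have key : ∀ (ps : List (String × Int)) (nd : PySem.Dict String Int),
      (∀ p ∈ ps, d.getD p.1 0 = p.2) →
      (ps.map Prod.fst).foldl (fun new_dict item =>
        if new_dict.contains item then
          new_dict.insert item (new_dict.getD item 0 + d.getD item 0)
        else
          new_dict.insert item (d.getD item 0)) nd
      = ps.foldl (fun out p => out.insert p.1 (out.getD p.1 0 + p.2)) nd := by
    intro ps
    induction ps with
    | nil => intro nd _; rfl
    | cons p t ih =>
      intro nd hv
      obtain ⟨a, b⟩ := p
      have hab : d.getD a 0 = b := hv (a, b) (by simp)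
      simp only [List.map_cons, List.foldl_cons]
      rw [show (if nd.contains a then nd.insert a (nd.getD a 0 + d.getD a 0)
            else nd.insert a (d.getD a 0)) = nd.insert a (nd.getD a 0 + b) by
        by_cases hc : nd.contains a = true
        · rw [if_pos hc, hab]
        · rw [if_neg hc, hab,
            PySem.Dict.getD_of_not_contains nd (k := a) 0 (by simpa using hc)]
          simp]
      exact ih _ (fun q hq => hv q (by simp [hq]))
  have : d.keys = d.items.map Prod.fst := rfl
  rw [this, key d.items nd (fun p hp => PySem.Dict.getD_of_mem_items d (by simpa using hp) hd 0)]

theorem add_recipes_pair (x y : PySem.Dict String Int) (hx : x.keys.Nodup) (hy : y.keys.Nodup) :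
    add_recipes [x, y] = pymergeB x y := by
  unfold add_recipes
  simp only [List.foldl_cons, List.foldl_nil]
  rw [addLoop_eq_pymergeB x PySem.Dict.empty hx, addLoop_eq_pymergeB y _ hy,
    pymergeB_empty_left x hx]

theorem mk_items (r : PySem.Dict String Int) : PySem.Dict.mk r.items = r := rfl

-- A's nested append-loops are flatMap/map
theorem foldl_append_shape (first : List (List (String × Int)))
    (rc : List (List (String × Int))) (f : List (String × Int) → List (String × Int) → List (String × Int)) :
    first.foldl (fun return_list dict1 =>
      rc.foldl (fun return_list dict2 => return_list ++ [f dict1 dict2]) return_list) []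
    = first.flatMap (fun d1 => rc.map (f d1)) := by
  have inner : ∀ (d1 : List (String × Int)) (acc : List (List (String × Int))),
      rc.foldl (fun return_list dict2 => return_list ++ [f d1 dict2]) acc = acc ++ rc.map (f d1) := by
    intro d1 acc
    induction rc generalizing acc with
    | nil => simp
    | cons h t ih => simp [ih]
  have outer : ∀ (acc : List (List (String × Int))),
      first.foldl (fun return_list dict1 =>
        rc.foldl (fun return_list dict2 => return_list ++ [f dict1 dict2]) return_list) acc
      = acc ++ first.flatMap (fun d1 => rc.map (f d1)) := by
    intro acc
    induction first generalizing acc with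
    | nil => simp
    | cons h t ih =>
      rw [List.foldl_cons, inner h acc, ih (acc ++ List.map (f h) rc),
        List.flatMap_cons, List.append_assoc]
  simpa using outer []

-- A computes the mapped product, for every nonempty input of duplicate-free dicts
theorem combine_eq_prodR (nr : List (List (List (String × Int)))) (hne : nr ≠ [])
    (hpre : ∀ l ∈ nr, ∀ d ∈ l, (d.map Prod.fst).Nodup) :
    combine_recipes nr = (prodR nr).map PySem.Dict.items := by
  induction nr with
  | nil => exact absurd rfl hne
  | cons first rest ih =>
    cases rest with
    | nil =>
      show first = ((prodR [first]).map PySem.Dict.items)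
      have h1 : prodR [first] = first.map PySem.Dict.mk := by
        show first.flatMap (fun d => [pymergeB (PySem.Dict.mk d) PySem.Dict.empty]) = _
        clear ih hne hpre
        induction first with
        | nil => rfl
        | cons h t iht => rw [List.flatMap_cons, iht, List.map_cons]; rfl
      rw [h1, List.map_map,
        show PySem.Dict.items ∘ PySem.Dict.mk (κ := String) (ν := Int) = id from rfl,
        List.map_id]
    | cons r rest' =>
      have hrest : ∀ l ∈ r :: rest', ∀ d ∈ l, (d.map Prod.fst).Nodup :=
        fun l hl => hpre l (by simp [hl])
      have ihr := ih (by simp) hrest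
      show (first.foldl (fun return_list dict1 =>
          (combine_recipes (r :: rest')).foldl (fun return_list dict2 =>
            return_list ++ [(add_recipes [PySem.Dict.mk dict1, PySem.Dict.mk dict2]).items]) return_list) [])
        = (prodR (first :: r :: rest')).map PySem.Dict.items
      rw [foldl_append_shape, ihr]
      have hR : prodR (first :: r :: rest')
          = first.flatMap (fun d => (prodR (r :: rest')).map
              (fun rr => pymergeB (PySem.Dict.mk d) rr)) := rfl
      rw [hR, List.map_flatMap]
      apply List.flatMap_congr
      intro d1 hd1
      rw [List.map_map, List.map_map]
      apply List.map_congr_left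
      intro rr hrr
      simp only [Function.comp]
      rw [mk_items, add_recipes_pair (PySem.Dict.mk d1) rr
        (by simpa [PySem.Dict.keys_mk] using hpre first (by simp) d1 hd1)
        (nodup_prodR _ hrest rr hrr)]

-- B's left fold over all lists equals flatMap into the right-nested product
theorem foldl_prod_eq (ls : List (List (List (String × Int))))
    (hls : ∀ l ∈ ls, ∀ d ∈ l, (d.map Prod.fst).Nodup) :
    ∀ (cs : List (PySem.Dict String Int)), (∀ c ∈ cs, c.keys.Nodup) →
    ls.foldl (fun combos recipe_list =>
        combos.flatMap (fun combo =>
          recipe_list.map (fun recipe => pymergeB combo (PySem.Dict.mk recipe)))) cs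
    = cs.flatMap (fun c => (prodR ls).map (pymergeB c)) := by
  induction ls with
  | nil =>
    intro cs _
    simp [prodR, pymergeB, PySem.Dict.empty]
  | cons l ls ih =>
    intro cs hcs
    simp only [List.foldl_cons]
    rw [ih (fun l' hl' => hls l' (by simp [hl'])) _ ?nodups]
    case nodups =>
      intro c hc
      simp only [List.mem_flatMap, List.mem_map] at hc
      obtain ⟨c0, hc0, d, _, rfl⟩ := hc
      exact nodup_keys_pymergeB _ _ (hcs c0 hc0)
    rw [List.flatMap_assoc]
    have hR : prodR (l :: ls)
        = l.flatMap (fun d => (prodR ls).map (fun rr => pymergeB (PySem.Dict.mk d) rr)) := rfl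
    rw [hR]
    apply List.flatMap_congr
    intro c hc
    rw [List.flatMap_map, List.map_flatMap]
    apply List.flatMap_congr
    intro d hd
    rw [List.map_map]
    apply List.map_congr_left
    intro rr hrr
    simp only [Function.comp]
    rw [pymergeB_assoc c (PySem.Dict.mk d) rr (hcs c hc)
      (by simpa [PySem.Dict.keys_mk] using hls l (by simp) d hd)
      (nodup_prodR ls (fun l' hl' => hls l' (by simp [hl'])) rr hrr)]

-- ===== VERDICT (by name: the statement is the Claim_ definition above) =====
theorem combine_recipes_spec : Claim_equal_combine_recipes := by
  intro nr _ hpre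
  unfold Spec_combine_recipes
  match nr with
  | [] => rfl
  | [first] => rfl
  | l1 :: l2 :: rest =>
    show combine_recipes (l1 :: l2 :: rest) = combine_recipes_alt (l1 :: l2 :: rest)
    rw [combine_eq_prodR _ (by simp) hpre]
    show ((prodR (l1 :: l2 :: rest)).map PySem.Dict.items)
      = (((l1 :: l2 :: rest).foldl
          (fun combos recipe_list =>
            combos.flatMap (fun combo =>
              recipe_list.map (fun recipe => pymergeB combo (PySem.Dict.mk recipe))))
          [PySem.Dict.empty]).map PySem.Dict.items)
    rw [foldl_prod_eq _ hpre [PySem.Dict.empty]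
      (by intro c hc; simp only [List.mem_singleton] at hc; subst hc
          simp [PySem.Dict.keys, PySem.Dict.empty])]
    rw [List.flatMap_cons, List.flatMap_nil, List.append_nil,
      List.map_congr_left (g := id)
        (fun rr hrr => pymergeB_empty_left rr (nodup_prodR _ hpre rr hrr)),
      List.map_id]
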